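-- pv_equiv track=rewrite | github.com/ravish-oo/arc-agi-oo-v2 | src/actions/__init__.py | local_ofa
-- ===== SOURCE A (Python) =====
-- from typing import List, Tuple
--
-- def local_ofa(patch: List[List[int]]) -> Tuple[Tuple[int, ...], ...]:
--     """
--     Apply local Order of First Appearance (OFA) to a patch.
--
--     Returns canonical patch as tuple of tuples where colors are relabeled
--     0, 1, 2, ... in order of first appearance (row-major scan).
--
--     This makes patches palette-invariant for LUT keys.
--     """
--     if not patch or not patch[0]:
--         return tuple()
--
--     h = len(patch)
--     w = len(patch[0])
--
--     # Build first-appearance mapping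
--     first_appearance = {}
--     next_id = 0
--
--     canonical = []
--     for r in range(h):
--         row = []
--         for c in range(w):
--             color = patch[r][c]
--             if color not in first_appearance:
--                 first_appearance[color] = next_id
--                 next_id += 1
--             row.append(first_appearance[color])
--         canonical.append(tuple(row))
--
--     return tuple(canonical)
-- ===== SOURCE B (Python) =====
-- from typing import List, Tuple
--
-- def local_ofa(patch: List[List[int]]) -> Tuple[Tuple[int, ...], ...]:
--     if not patch or not patch[0]:
--         return tuple()
--     w = len(patch[0])
--     cells = [row[c] for row in patch for c in range(w)]
--     # a color's OFA id = number of distinct colors appearing strictly before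
--     # its first occurrence in the row-major cell stream
--     return tuple(
--         tuple(len(set(cells[:cells.index(row[c])])) for c in range(w))
--         for row in patch
--     )
-- ===== Notes on version B (the rewrite author's own statement) =====
-- stated objective: alternative
-- what changed: B keeps no mapping dict at all: it flattens the grid once and computes each cell's label directly as the number of distinct colors occurring strictly before that color's first occurrence in the row-major cell stream (len(set(cells[:cells.index(v)]))), instead of A's single stateful pass that grows a first-appearance dict and a next_id counter.
import Mathlib
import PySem

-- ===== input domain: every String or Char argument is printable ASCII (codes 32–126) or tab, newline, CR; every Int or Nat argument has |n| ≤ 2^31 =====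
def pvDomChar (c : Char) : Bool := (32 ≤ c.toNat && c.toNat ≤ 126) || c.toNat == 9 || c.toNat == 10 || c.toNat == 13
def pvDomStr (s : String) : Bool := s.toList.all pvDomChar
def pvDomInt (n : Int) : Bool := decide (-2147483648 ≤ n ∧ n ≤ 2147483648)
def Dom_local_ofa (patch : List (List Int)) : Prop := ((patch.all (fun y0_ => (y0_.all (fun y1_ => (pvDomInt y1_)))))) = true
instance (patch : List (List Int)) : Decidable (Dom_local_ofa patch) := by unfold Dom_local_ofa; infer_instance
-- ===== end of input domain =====

-- B keeps no mapping dict at all: it flattens the grid once and computes each cell's label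
-- directly as the number of distinct colors occurring strictly before that color's first
-- occurrence in the row-major cell stream; A grows a first-appearance dict and a counter in
-- one stateful nested loop. Objective: alternative (dict-free) algorithm, same results.

-- ===== PORT A =====
def local_ofa (patch : List (List Int)) : List (List Int) :=
  if patch = [] ∨ patch.headD [] = [] then []
  else
    let h : Int := PySem.List.len patch
    let w : Int := PySem.List.len (patch.headD [])
    let res :=
      (PySem.List.pyRange 0 h).foldl
        (fun (st : PySem.Dict Int Int × Int × List (List Int)) r =>
          -- patch[r]: r ∈ range(h) is always in range, so pyGetD is exact here
          let rowv := PySem.List.pyGetD patch r []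
          let inner :=
            (PySem.List.pyRange 0 w).foldl
              (fun (st2 : PySem.Dict Int Int × Int × List Int) c =>
                -- patch[r][c]: in range under Pre_local_ofa, so pyGetD is exact here
                let color := PySem.List.pyGetD rowv c 0
                if st2.1.contains color then
                  (st2.1, st2.2.1, st2.2.2 ++ [st2.1.getD color 0])
                else
                  (st2.1.insert color st2.2.1, st2.2.1 + 1,
                   st2.2.2 ++ [(st2.1.insert color st2.2.1).getD color 0]))
              (st.1, st.2.1, ([] : List Int))
          (inner.1, inner.2.1, st.2.2 ++ [inner.2.2]))
        (PySem.Dict.mk [], 0, ([] : List (List Int)))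
    res.2.2

-- ===== PORT B =====
def local_ofa_alt (patch : List (List Int)) : List (List Int) :=
  if patch = [] ∨ patch.headD [] = [] then []
  else
    let w : Int := PySem.List.len (patch.headD [])
    -- row[c]: in range under Pre_local_ofa, so pyGetD is exact here
    let cells := patch.flatMap (fun row => (PySem.List.pyRange 0 w).map (fun c => PySem.List.pyGetD row c 0))
    -- cells.index(v): every looked-up v is in cells, so index? is some and getD's default is never used
    patch.map (fun row => (PySem.List.pyRange 0 w).map (fun c =>
      ((PySem.Set.ofList (PySem.List.slice cells none
          (some (((PySem.List.index? cells (PySem.List.pyGetD row c 0)).getD 0 : Nat) : Int)))).length : Int)))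

-- ===== PRECONDITION & SPEC =====
-- Pre_ excludes exactly the ragged grids on which A raises IndexError (some row shorter than the first row).
def Pre_local_ofa (patch : List (List Int)) : Prop :=
  ∀ row ∈ patch, (patch.headD []).length ≤ row.length
instance (patch : List (List Int)) : Decidable (Pre_local_ofa patch) := by unfold Pre_local_ofa; infer_instance

def pvWitness_local_ofa : List (List Int) := [[3, 3, 1], [1, 2, 3]]

def Spec_local_ofa (patch : List (List Int)) (out : List (List Int)) : Prop := out = local_ofa_alt patch
instance (patch : List (List Int)) (out : List (List Int)) : Decidable (Spec_local_ofa patch out) := by unfold Spec_local_ofa; infer_instance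

-- ===== CLAIM (what is proved, stated in full; the proofs are below) =====
def Claim_equal_local_ofa : Prop := ∀ (patch : List (List Int)), Dom_local_ofa patch → Pre_local_ofa patch → Spec_local_ofa patch (local_ofa patch)

-- ===== LEMMAS AND PROOFS =====

-- the id of color x in the full cell stream F (its position in the first-appearance order)
def pvPhi (F : List Int) (x : Int) : Int := (((PySem.List.index? (PySem.List.dedup F) x).getD 0 : Nat) : Int)

-- the dict A's loop holds after consuming the cell prefix p, as an explicit table
def pvTab (p : List Int) : PySem.Dict Int Int :=
  ⟨((PySem.List.dedup p).zipIdx).map (fun ci => (ci.1, (ci.2 : Int)))⟩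

lemma pv_find_tab (us : List Int) (k : Nat) (x : Int) :
    List.find? (fun pr => pr.1 == x) ((us.zipIdx k).map (fun ci => (ci.1, (ci.2 : Int))))
      = (List.idxOf? x us).map (fun i => (x, ((i + k : Nat) : Int))) := by
  induction us generalizing k with
  | nil => simp
  | cons u t ih =>
    simp only [List.zipIdx_cons, List.map_cons, List.find?_cons, List.idxOf?_cons]
    by_cases h : u = x
    · simp [h]
    · simp only [show (u == x) = false by simp [h]]
      rw [ih (k + 1)]
      cases List.idxOf? x t <;> simp
      omega

lemma pv_tab_get? (p : List Int) (x : Int) :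
    (pvTab p).get? x = (List.idxOf? x (PySem.List.dedup p)).map (fun i => (i : Int)) := by
  simp only [pvTab, PySem.Dict.get?]
  rw [show (PySem.List.dedup p).zipIdx = (PySem.List.dedup p).zipIdx 0 from rfl, pv_find_tab]
  cases List.idxOf? x (PySem.List.dedup p) <;> simp

lemma pv_any_zipIdx (us : List Int) (k : Nat) (x : Int) :
    ((us.zipIdx k).map (fun ci => (ci.1, (ci.2 : Int)))).any (fun pr => pr.1 == x)
      = us.any (fun u => u == x) := by
  induction us generalizing k with
  | nil => simp
  | cons u t ih => simp [List.zipIdx_cons, ih]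

lemma pv_tab_contains (p : List Int) (x : Int) :
    (pvTab p).contains x = true ↔ x ∈ p := by
  simp only [pvTab, PySem.Dict.contains, pv_any_zipIdx]
  simp only [List.any_eq_true, beq_iff_eq]
  constructor
  · rintro ⟨u, hu, rfl⟩; exact (PySem.List.mem_dedup p u).mp hu
  · intro hx; exact ⟨x, (PySem.List.mem_dedup p x).mpr hx, rfl⟩

lemma pv_dedup_snoc_mem (p : List Int) (x : Int) (h : x ∈ p) :
    PySem.List.dedup (p ++ [x]) = PySem.List.dedup p := by
  simp only [PySem.List.dedup_eq_ofList, PySem.Set.ofList, List.foldl_append, List.foldl_cons,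
    List.foldl_nil]
  have hx : x ∈ List.foldl PySem.Set.add ([] : List Int) p := (PySem.Set.mem_ofList p x).mpr h
  simp [PySem.Set.add, hx]

lemma pv_dedup_snoc_not_mem (p : List Int) (x : Int) (h : ¬ x ∈ p) :
    PySem.List.dedup (p ++ [x]) = PySem.List.dedup p ++ [x] := by
  simp only [PySem.List.dedup_eq_ofList, PySem.Set.ofList, List.foldl_append, List.foldl_cons,
    List.foldl_nil]
  have hx : ¬ x ∈ List.foldl PySem.Set.add ([] : List Int) p :=
    fun hm => h ((PySem.Set.mem_ofList p x).mp hm)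
  simp [PySem.Set.add, hx]

lemma pv_foldl_add_exists (t acc : List Int) :
    ∃ e, List.foldl PySem.Set.add acc t = acc ++ e := by
  induction t generalizing acc with
  | nil => exact ⟨[], by simp⟩
  | cons x t' ih =>
    simp only [List.foldl_cons, PySem.Set.add]
    by_cases h : PySem.Set.contains acc x = true
    · rw [if_pos h]; exact ih acc
    · rw [if_neg h]
      obtain ⟨e, he⟩ := ih (acc ++ [x])
      exact ⟨[x] ++ e, by simpa using he⟩

lemma pv_dedup_append_exists (p t : List Int) :
    ∃ e, PySem.List.dedup (p ++ t) = PySem.List.dedup p ++ e := by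
  simp only [PySem.List.dedup_eq_ofList, PySem.Set.ofList, List.foldl_append]
  exact pv_foldl_add_exists t _

lemma pv_phi_stable (p t : List Int) (x : Int) (h : x ∈ p) :
    pvPhi (p ++ t) x = (((List.idxOf? x (PySem.List.dedup p)).getD 0 : Nat) : Int) := by
  obtain ⟨e, he⟩ := pv_dedup_append_exists p t
  have hm : x ∈ PySem.List.dedup p := (PySem.List.mem_dedup p x).mpr h
  have : PySem.List.index? (PySem.List.dedup p ++ e) x = PySem.List.index? (PySem.List.dedup p) x :=
    PySem.List.index?_append_of_mem e hm
  simp only [pvPhi, he, this]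
  rfl

lemma pv_idxOf_snoc_self (us : List Int) (x : Int) (hm : ¬ x ∈ us) :
    List.idxOf? x (us ++ [x]) = some us.length := by
  induction us with
  | nil => simp [List.idxOf?_cons]
  | cons u t ih =>
    have h1 : ¬ x = u := by simp_all
    have h2 : ¬ x ∈ t := by simp_all
    have hne : (u == x) = false := by simpa using fun h' => h1 h'.symm
    simp [List.idxOf?_cons, hne, ih h2]

-- pvPhi at a fresh color x appended after prefix p: it gets id |dedup p|
lemma pv_phi_fresh (p t : List Int) (x : Int) (h : ¬ x ∈ p) :
    pvPhi (p ++ x :: t) x = ((PySem.List.dedup p).length : Int) := by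
  have : p ++ x :: t = (p ++ [x]) ++ t := by simp
  rw [this, pv_phi_stable (p ++ [x]) t x (by simp), pv_dedup_snoc_not_mem p x h]
  have hm : ¬ x ∈ PySem.List.dedup p := fun hm => h ((PySem.List.mem_dedup p x).mp hm)
  rw [pv_idxOf_snoc_self _ _ hm]
  simp

lemma pv_phi_mem (p t : List Int) (x : Int) (h : x ∈ p) :
    pvPhi (p ++ t) x = (pvTab p).getD x 0 := by
  rw [pv_phi_stable p t x h, PySem.Dict.getD, pv_tab_get?]
  have hm : x ∈ PySem.List.dedup p := (PySem.List.mem_dedup p x).mpr h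
  cases hcase : List.idxOf? x (PySem.List.dedup p) with
  | none => rw [List.idxOf?_eq_none_iff] at hcase; exact absurd hm hcase
  | some i => simp

lemma pv_tab_insert_fresh (p : List Int) (x : Int) (h : ¬ x ∈ p) :
    (pvTab p).insert x (((PySem.List.dedup p).length : Nat) : Int) = pvTab (p ++ [x]) := by
  have hc : (pvTab p).contains x = false := by
    cases hb : (pvTab p).contains x
    · rfl
    · exact absurd ((pv_tab_contains p x).mp hb) h
  simp only [PySem.Dict.insert, hc, Bool.false_eq_true, if_false]
  unfold pvTab
  rw [pv_dedup_snoc_not_mem p x h, List.zipIdx_append]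
  simp

-- the cell values A's inner loop reads from a row (row[c] for c in range(w))
def pvCells (w : Int) (row : List Int) : List Int :=
  (PySem.List.pyRange 0 w).map (fun c => PySem.List.pyGetD row c 0)

-- A's inner-loop body, on the cell value
def pvStep (st2 : PySem.Dict Int Int × Int × List Int) (color : Int) :
    PySem.Dict Int Int × Int × List Int :=
  if st2.1.contains color then
    (st2.1, st2.2.1, st2.2.2 ++ [st2.1.getD color 0])
  else
    (st2.1.insert color st2.2.1, st2.2.1 + 1,
     st2.2.2 ++ [(st2.1.insert color st2.2.1).getD color 0])

-- A's outer-loop body, on the row value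
def pvRowStep (w : Int) (st : PySem.Dict Int Int × Int × List (List Int)) (rowv : List Int) :
    PySem.Dict Int Int × Int × List (List Int) :=
  let inner :=
    (PySem.List.pyRange 0 w).foldl
      (fun st2 c => pvStep st2 (PySem.List.pyGetD rowv c 0)) (st.1, st.2.1, ([] : List Int))
  (inner.1, inner.2.1, st.2.2 ++ [inner.2.2])

lemma pv_inner (F : List Int) (cs : List Int) : ∀ (p acc t : List Int), p ++ (cs ++ t) = F →
    cs.foldl pvStep (pvTab p, ((PySem.List.dedup p).length : Int), acc)
      = (pvTab (p ++ cs), ((PySem.List.dedup (p ++ cs)).length : Int), acc ++ cs.map (pvPhi F)) := by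
  induction cs with
  | nil => intro p acc t hF; simp
  | cons x cs' ih =>
    intro p acc t hF
    simp only [List.foldl_cons]
    by_cases h : x ∈ p
    · have hc : (pvTab p).contains x = true := (pv_tab_contains p x).mpr h
      have hstep : pvStep (pvTab p, ((PySem.List.dedup p).length : Int), acc) x
          = (pvTab p, ((PySem.List.dedup p).length : Int), acc ++ [pvPhi F x]) := by
        simp only [pvStep, hc, if_true]
        rw [show pvPhi F x = (pvTab p).getD x 0 from by
          rw [← hF]; exact pv_phi_mem p (x :: cs' ++ t) x h]
      rw [hstep]
      have htab : pvTab (p ++ [x]) = pvTab p := by unfold pvTab; rw [pv_dedup_snoc_mem p x h]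
      have hlen : PySem.List.dedup (p ++ [x]) = PySem.List.dedup p := pv_dedup_snoc_mem p x h
      have := ih (p ++ [x]) (acc ++ [pvPhi F x]) t (by simpa using hF)
      rw [htab, hlen] at this
      rw [this]
      simp
    · have hc : (pvTab p).contains x = false := by
        cases hb : (pvTab p).contains x
        · rfl
        · exact absurd ((pv_tab_contains p x).mp hb) h
      have hphi : pvPhi F x = ((PySem.List.dedup p).length : Int) := by
        rw [← hF]; exact pv_phi_fresh p (cs' ++ t) x h
      have hstep : pvStep (pvTab p, ((PySem.List.dedup p).length : Int), acc) x
          = (pvTab (p ++ [x]), ((PySem.List.dedup (p ++ [x])).length : Int), acc ++ [pvPhi F x]) := by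
        simp only [pvStep, hc, Bool.false_eq_true, if_neg (by simp : ¬False)]
        rw [show ((PySem.List.dedup p).length : Int) = (((PySem.List.dedup p).length : Nat) : Int) from rfl,
          pv_tab_insert_fresh p x h]
        have hg : (pvTab (p ++ [x])).getD x 0 = ((PySem.List.dedup p).length : Int) := by
          rw [PySem.Dict.getD, pv_tab_get?, pv_dedup_snoc_not_mem p x h,
            pv_idxOf_snoc_self _ _ (fun hm => h ((PySem.List.mem_dedup p x).mp hm))]
          simp
        simp only [pv_dedup_snoc_not_mem p x h, List.length_append, List.length_cons,
          List.length_nil, hg, hphi, Prod.mk.injEq]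
        refine ⟨trivial, by push_cast; ring, trivial⟩
      rw [hstep]
      have := ih (p ++ [x]) (acc ++ [pvPhi F x]) t (by simpa using hF)
      rw [this]
      simp

lemma pv_outer (F : List Int) (w : Int) (rows : List (List Int)) :
    ∀ (p : List Int) (accG : List (List Int)) (t : List Int),
      p ++ (rows.flatMap (pvCells w) ++ t) = F →
    rows.foldl (pvRowStep w) (pvTab p, ((PySem.List.dedup p).length : Int), accG)
      = (pvTab (p ++ rows.flatMap (pvCells w)),
         ((PySem.List.dedup (p ++ rows.flatMap (pvCells w))).length : Int),
         accG ++ rows.map (fun row => (pvCells w row).map (pvPhi F))) := by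
  induction rows with
  | nil => intro p accG t hF; simp
  | cons row rest ih =>
    intro p accG t hF
    simp only [List.foldl_cons, pvRowStep]
    have hinner := pv_inner F (pvCells w row) p [] (rest.flatMap (pvCells w) ++ t)
      (by simpa [List.flatMap_cons, List.append_assoc] using hF)
    simp only [pvCells, List.foldl_map] at hinner
    rw [hinner]
    have := ih (p ++ pvCells w row) (accG ++ [(pvCells w row).map (pvPhi F)]) t
      (by simpa [List.flatMap_cons, List.append_assoc] using hF)
    simp only [pvCells] at this ⊢
    rw [show (([] : List Int) ++ List.map (pvPhi F) (List.map (fun c => PySem.List.pyGetD row c 0) (PySem.List.pyRange 0 w))) = List.map (pvPhi F) (List.map (fun c => PySem.List.pyGetD row c 0) (PySem.List.pyRange 0 w)) from by simp]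
    rw [this]
    simp [pvCells, List.flatMap_cons, List.append_assoc]

-- B's per-cell value: the distinct count of the prefix before x's first occurrence is x's OFA id
lemma pv_setlen (F : List Int) (x : Int) (h : x ∈ F) :
    ((PySem.Set.ofList (PySem.List.slice F none
        (some (((PySem.List.index? F x).getD 0 : Nat) : Int)))).length : Int) = pvPhi F x := by
  have hs : (PySem.List.index? F x).isSome := (PySem.List.index?_isSome_iff F x).mpr h
  obtain ⟨k, hk⟩ := Option.isSome_iff_exists.mp hs
  obtain ⟨p, t, hF, hlen, hnp⟩ := (PySem.List.index?_eq_some_iff F x k).mp hk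
  subst hF
  rw [hk, PySem.List.slice_to_natCast]
  simp only [Option.getD_some, ← hlen, List.take_left]
  rw [pv_phi_fresh p t x hnp]
  simp [← PySem.List.dedup_eq_ofList]

-- ===== VERDICT (by name: the statement is the Claim_ definition above) =====
theorem local_ofa_spec : Claim_equal_local_ofa := by
  unfold Claim_equal_local_ofa Spec_local_ofa
  intro patch _ _
  by_cases hg : patch = [] ∨ patch.headD [] = []
  · simp only [local_ofa, local_ofa_alt]
    rw [if_pos hg, if_pos hg]
  · have hA : local_ofa patch
        = (patch.foldl (pvRowStep (PySem.List.len (patch.headD [])))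
            (PySem.Dict.mk [], 0, ([] : List (List Int)))).2.2 := by
      simp only [local_ofa]
      rw [if_neg hg]
      have h := PySem.List.foldl_pyRange_pyGetD patch ([] : List Int)
        (pvRowStep (PySem.List.len (patch.headD [])))
        (PySem.Dict.mk [], 0, ([] : List (List Int))) (le_refl 0)
      simp only [Int.toNat_zero, List.drop_zero] at h
      exact congrArg (fun z => z.2.2) h
    have houter := pv_outer (patch.flatMap (pvCells (PySem.List.len (patch.headD []))))
      (PySem.List.len (patch.headD [])) patch [] [] [] (by simp)
    have hB : local_ofa_alt patch
        = patch.map (fun row => (pvCells (PySem.List.len (patch.headD [])) row).map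
            (fun x => ((PySem.Set.ofList (PySem.List.slice
                (patch.flatMap (pvCells (PySem.List.len (patch.headD [])))) none
                (some (((PySem.List.index? (patch.flatMap (pvCells (PySem.List.len (patch.headD []))))
                  x).getD 0 : Nat) : Int)))).length : Int))) := by
      simp only [local_ofa_alt]
      rw [if_neg hg]
      simp only [pvCells, List.map_map]
      rfl
    rw [hA, hB]
    rw [show (PySem.Dict.mk [] : PySem.Dict Int Int) = pvTab [] from rfl,
      show (0 : Int) = ((PySem.List.dedup ([] : List Int)).length : Int) from rfl, houter]
    simp only [List.nil_append]
    refine List.map_congr_left (fun row hrow => (List.map_congr_left (fun x hx => ?_)).symm)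
    have hxF : x ∈ patch.flatMap (pvCells (PySem.List.len (patch.headD []))) :=
      List.mem_flatMap.mpr ⟨row, hrow, hx⟩
    exact pv_setlen _ x hxF
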